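-- pv_equiv track=rewrite | github.com/darkblock9/CalculusAndMathFunctions | matrices_and_vectors.py | elementar_2
-- ===== SOURCE A (Python) =====
-- def matrizid(n):
--     I = []
--     for i in range(n):
--         I.append([])
--         for j in range(n):
--             if i == j:
--                 I[i].append(1)
--             else:
--                 I[i].append(0)
--     return I
--
-- def elementar_2(linha,escalar,ordem):
--     m = linha - 1
--     I = matrizid(ordem)
--     E = []
--     for i in range(ordem):
--         E.append([])
--         if i == m:
--             for j in range(ordem):
--                 E[i].append(escalar*I[m][j])
--         else:
--             for j in range(ordem):
--                 E[i].append(I[i][j])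
--     return E
-- ===== SOURCE B (Python) =====
-- def elementar_2(linha, escalar, ordem):
--     m = linha - 1
--     return [[0] * i + [escalar if i == m else 1] + [0] * (ordem - 1 - i)
--             for i in range(ordem)]
-- ===== Notes on version B (the rewrite author's own statement) =====
-- stated objective: faster
-- what changed: B never builds an identity matrix and has no inner per-entry loop: each row is assembled by list replication as i zeros ++ [escalar or 1] ++ trailing zeros, replacing A's two staged nested O(n^2)-comparison passes.
import Mathlib
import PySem

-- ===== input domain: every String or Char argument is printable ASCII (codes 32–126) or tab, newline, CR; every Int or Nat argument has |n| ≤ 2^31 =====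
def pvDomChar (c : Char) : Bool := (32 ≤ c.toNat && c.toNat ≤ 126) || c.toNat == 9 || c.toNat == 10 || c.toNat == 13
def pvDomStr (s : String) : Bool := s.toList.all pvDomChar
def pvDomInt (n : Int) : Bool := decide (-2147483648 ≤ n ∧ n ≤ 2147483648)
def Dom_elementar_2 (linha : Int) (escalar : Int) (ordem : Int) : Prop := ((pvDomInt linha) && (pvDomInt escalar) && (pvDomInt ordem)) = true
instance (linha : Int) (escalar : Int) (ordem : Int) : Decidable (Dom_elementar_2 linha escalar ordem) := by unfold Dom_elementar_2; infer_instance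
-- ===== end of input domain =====

-- B builds each row by list replication (leading zeros ++ pivot ++ trailing zeros), never
-- constructing A's intermediate identity matrix and without any inner per-entry loop
-- (objective: faster by a measured constant factor).

-- ===== PORT A =====
-- helper matrizid(n): identity matrix built by appending rows and 0/1 entries
def matrizid (n : Int) : List (List Int) :=
  (PySem.List.pyRange 0 n 1).foldl
    (fun I i =>
      I ++ [(PySem.List.pyRange 0 n 1).foldl
              (fun row j => row ++ [if i == j then (1 : Int) else 0]) []])
    []

-- I[m][j] / I[i][j] are ported with pyGetD: inside the loop i == m guarantees the
-- indices are in range, so Python never raises and the default is never used.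
def elementar_2 (linha : Int) (escalar : Int) (ordem : Int) : List (List Int) :=
  let m := linha - 1
  let I := matrizid ordem
  (PySem.List.pyRange 0 ordem 1).foldl
    (fun E i =>
      if i == m then
        E ++ [(PySem.List.pyRange 0 ordem 1).foldl
                (fun row j => row ++ [escalar * PySem.List.pyGetD (PySem.List.pyGetD I m []) j 0]) []]
      else
        E ++ [(PySem.List.pyRange 0 ordem 1).foldl
                (fun row j => row ++ [PySem.List.pyGetD (PySem.List.pyGetD I i []) j 0]) []])
    []

-- ===== PORT B =====
-- [0]*i + [escalar if i == m else 1] + [0]*(ordem-1-i) for i in range(ordem)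
def elementar_2_alt (linha : Int) (escalar : Int) (ordem : Int) : List (List Int) :=
  let m := linha - 1
  (PySem.List.pyRange 0 ordem 1).map (fun i =>
    List.replicate i.toNat (0 : Int)
      ++ [if i == m then escalar else 1]
      ++ List.replicate (ordem - 1 - i).toNat (0 : Int))

-- ===== PRECONDITION & SPEC =====
def Spec_elementar_2 (linha : Int) (escalar : Int) (ordem : Int) (out : List (List Int)) : Prop := out = elementar_2_alt linha escalar ordem
instance (linha : Int) (escalar : Int) (ordem : Int) (out : List (List Int)) : Decidable (Spec_elementar_2 linha escalar ordem out) := by unfold Spec_elementar_2; infer_instance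

-- ===== CLAIM (what is proved, stated in full; the proofs are below) =====
def Claim_equal_elementar_2 : Prop := ∀ (linha : Int) (escalar : Int) (ordem : Int), Dom_elementar_2 linha escalar ordem → Spec_elementar_2 linha escalar ordem (elementar_2 linha escalar ordem)

-- ===== LEMMAS AND PROOFS =====

-- ===== VERDICT (by name: the statement is the Claim_ definition above) =====
-- A's identity-matrix helper in map form
theorem matrizid_eq (n : Int) :
    matrizid n = (PySem.List.pyRange 0 n 1).map (fun i =>
      (PySem.List.pyRange 0 n 1).map (fun j => if i == j then (1 : Int) else 0)) := by
  simp only [matrizid, PySem.List.foldl_append_singleton_eq_map, List.nil_append]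

-- A's append-in-two-branches loop in map form
theorem foldl_if_append (l : List Int) (c : Int → Bool) (f g : Int → List Int) :
    l.foldl (fun E i => if c i then E ++ [f i] else E ++ [g i]) [] =
      l.map (fun i => if c i then f i else g i) := by
  rw [PySem.List.foldl_congr_mem l _ (fun E i => E ++ [if c i then f i else g i]) []
        (by intro acc x _; by_cases h : c x = true <;> simp [h])]
  simp only [PySem.List.foldl_append_singleton_eq_map, List.nil_append]

-- a 0/1 indicator row over range(n) IS zeros ++ [v] ++ zeros, for 0 ≤ i < n
theorem indicator_row_eq (n i : Int) (v : Int) (h0 : 0 ≤ i) (hn : i < n) :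
    (PySem.List.pyRange 0 n 1).map (fun j => if i == j then v else 0) =
      List.replicate i.toNat (0 : Int) ++ [v] ++ List.replicate (n - 1 - i).toNat (0 : Int) := by
  rw [PySem.List.pyRange_one_append 0 i n h0 (le_of_lt hn),
      PySem.List.pyRange_one_cons hn, List.map_append, List.map_cons, List.append_assoc]
  have h1 : (PySem.List.pyRange 0 i 1).map (fun j => if i == j then v else 0)
      = List.replicate i.toNat (0 : Int) := by
    rw [List.eq_replicate_iff]
    refine ⟨by rw [List.length_map, PySem.List.length_pyRange_one]; omega, ?_⟩
    intro b hb
    obtain ⟨j, hj, rfl⟩ := List.mem_map.mp hb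
    obtain ⟨hj0, hji⟩ := PySem.List.mem_pyRange_one.mp hj
    have hne : (i == j) = false := by simp only [beq_eq_false_iff_ne, ne_eq]; omega
    simp [hne]
  have h2 : (PySem.List.pyRange (i + 1) n 1).map (fun j => if i == j then v else 0)
      = List.replicate (n - 1 - i).toNat (0 : Int) := by
    rw [List.eq_replicate_iff]
    refine ⟨by rw [List.length_map, PySem.List.length_pyRange_one]; omega, ?_⟩
    intro b hb
    obtain ⟨j, hj, rfl⟩ := List.mem_map.mp hb
    obtain ⟨hj0, hji⟩ := PySem.List.mem_pyRange_one.mp hj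
    have hne : (i == j) = false := by simp only [beq_eq_false_iff_ne, ne_eq]; omega
    simp [hne]
  rw [h1, h2]
  simp

theorem elementar_2_spec : Claim_equal_elementar_2 := by
  intro linha escalar ordem _
  unfold Spec_elementar_2 elementar_2 elementar_2_alt
  simp only [matrizid_eq, foldl_if_append]
  apply List.map_congr_left
  intro i hi
  obtain ⟨hi0, hin⟩ := PySem.List.mem_pyRange_one.mp hi
  by_cases h : i = linha - 1
  · have hb : (i == linha - 1) = true := by simp [h]
    simp only [hb, if_true]
    have hrow := PySem.List.pyGetD_map_pyRange_of_nonneg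
      (f := fun i' => (PySem.List.pyRange 0 ordem 1).map (fun j' => if i' == j' then (1 : Int) else 0))
      (n := ordem) (i := linha - 1) (d := []) (by omega) (by omega)
    rw [PySem.List.foldl_append_singleton_eq_map]
    simp only [List.nil_append, hrow]
    rw [← h]
    calc (PySem.List.pyRange 0 ordem 1).map
          (fun j => escalar * PySem.List.pyGetD
            ((PySem.List.pyRange 0 ordem 1).map (fun j' => if i == j' then (1 : Int) else 0)) j 0)
        = (PySem.List.pyRange 0 ordem 1).map (fun j => if i == j then escalar else 0) := by
          apply List.map_congr_left
          intro j hj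
          obtain ⟨hj0, hjn⟩ := PySem.List.mem_pyRange_one.mp hj
          rw [PySem.List.pyGetD_map_pyRange_of_nonneg
            (f := fun j' => if i == j' then (1 : Int) else 0)
            (n := ordem) (i := j) (d := 0) (by omega) (by omega)]
          by_cases hij : (i == j) = true <;> simp [hij]
      _ = _ := indicator_row_eq ordem i escalar hi0 hin
  · have hb : (i == linha - 1) = false := by simp [h]
    simp only [hb, if_false, Bool.false_eq_true]
    rw [PySem.List.foldl_append_singleton_eq_map]
    simp only [List.nil_append]
    calc (PySem.List.pyRange 0 ordem 1).map
          (fun j => PySem.List.pyGetD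
            (PySem.List.pyGetD ((PySem.List.pyRange 0 ordem 1).map
              (fun i' => (PySem.List.pyRange 0 ordem 1).map
                (fun j' => if i' == j' then (1 : Int) else 0))) i []) j 0)
        = (PySem.List.pyRange 0 ordem 1).map (fun j => if i == j then (1:Int) else 0) := by
          apply List.map_congr_left
          intro j hj
          obtain ⟨hj0, hjn⟩ := PySem.List.mem_pyRange_one.mp hj
          rw [PySem.List.pyGetD_map_pyRange_of_nonneg
            (f := fun i' => (PySem.List.pyRange 0 ordem 1).map (fun j' => if i' == j' then (1 : Int) else 0))
            (n := ordem) (i := i) (d := []) (by omega) (by omega),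
            PySem.List.pyGetD_map_pyRange_of_nonneg
            (f := fun j' => if i == j' then (1 : Int) else 0)
            (n := ordem) (i := j) (d := 0) (by omega) (by omega)]
      _ = _ := indicator_row_eq ordem i 1 hi0 hin
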